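-- pv_equiv track=rewrite | github.com/TaeTanakrit0089/Prepro65-Code | 97.SoftDrink2.py | check_error
-- ===== SOURCE A (Python) =====
-- def check_error(gusfring):
--     '''Galileo, Figaro - magnificoo'''
--     cuttery = [['cup', 5], ['ice', 5]]
--     juice = [['orange', 17], ['banana', 13], ['strawberry', 10],
--              ['cherrie', 15], ['watermelon', 12], ['lemon', 19], ['mango', 21],
--              ['grape', 11]]
--     soda = [['coke', 15], ['pepsi', 15], ['sprite', 15], ['fanta', 15]]
--     if gusfring == 'end' or gusfring == 'cup' or gusfring == 'ice':
--         return False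
--     for i in range(len(cuttery)):
--         if gusfring in cuttery[i]:
--             return False
--     for i in range(len(juice)):
--         if gusfring in juice[i]:
--             return False
--     for i in range(len(soda)):
--         if gusfring in soda[i]:
--             return False
--     return True
-- ===== SOURCE B (Python) =====
-- _WORDS = ('end', 'cup', 'ice', 'orange', 'banana', 'strawberry', 'cherrie',
--           'watermelon', 'lemon', 'mango', 'grape', 'coke', 'pepsi', 'sprite',
--           'fanta')
--
-- # Prefix trie built once from the disallowed names: nested dicts keyed by
-- # single characters; the key '' marks the end of a complete word.
-- _TRIE = {}
-- for _w in _WORDS: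
--     _node = _TRIE
--     for _ch in _w:
--         _node = _node.setdefault(_ch, {})
--     _node[''] = True
--
--
-- def check_error(gusfring):
--     '''Galileo, Figaro - magnificoo'''
--     node = _TRIE
--     for ch in gusfring:
--         if ch not in node:
--             return True
--         node = node[ch]
--     return '' not in node
-- ===== Notes on version B (the rewrite author's own statement) =====
-- stated objective: alternative
-- what changed: Replaces the explicit guard plus three linear scans over nested [name, number] sublists with a character-by-character walk of a prefix trie built once from the disallowed names, returning True as soon as a character has no trie edge.
import Mathlib
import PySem

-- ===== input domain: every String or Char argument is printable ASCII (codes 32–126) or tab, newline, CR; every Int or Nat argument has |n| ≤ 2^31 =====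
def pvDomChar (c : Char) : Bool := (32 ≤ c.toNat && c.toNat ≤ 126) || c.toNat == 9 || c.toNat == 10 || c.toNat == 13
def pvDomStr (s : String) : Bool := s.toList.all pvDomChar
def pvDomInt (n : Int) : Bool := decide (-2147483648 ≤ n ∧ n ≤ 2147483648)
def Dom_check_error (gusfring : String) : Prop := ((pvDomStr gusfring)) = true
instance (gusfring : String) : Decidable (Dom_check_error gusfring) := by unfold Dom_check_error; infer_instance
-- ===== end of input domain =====

-- B replaces the 'end'/'cup'/'ice' guard and the three index loops over nested
-- [name, number] sublists by a character-by-character walk of a prefix trie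
-- built once from the disallowed names (objective: alternative).


-- ===== PORT A =====
-- Each sublist ['cup', 5] is a (String × Int) pair; 'gusfring in row' for a
-- string gusfring is exact as equality with the name component, since a Python
-- str never equals an int.
def pvRowsCuttery : List (String × Int) := [("cup", 5), ("ice", 5)]
def pvRowsJuice : List (String × Int) :=
  [("orange", 17), ("banana", 13), ("strawberry", 10), ("cherrie", 15),
   ("watermelon", 12), ("lemon", 19), ("mango", 21), ("grape", 11)]
def pvRowsSoda : List (String × Int) :=
  [("coke", 15), ("pepsi", 15), ("sprite", 15), ("fanta", 15)]

-- the 'for i in range(len(..)): if gusfring in ..[i]: return False' loop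
def pvScanRows (gusfring : String) : List (String × Int) → Bool
  | [] => false
  | r :: rest => if gusfring == r.1 then true else pvScanRows gusfring rest

def check_error (gusfring : String) : Bool :=
  if gusfring == "end" || gusfring == "cup" || gusfring == "ice" then false
  else if pvScanRows gusfring pvRowsCuttery then false
  else if pvScanRows gusfring pvRowsJuice then false
  else if pvScanRows gusfring pvRowsSoda then false
  else true

-- ===== PORT B =====
-- Source B's nested-dict trie, encoded left-child/right-sibling (an association
-- dict {char: subtrie} is exactly an ordered sibling chain of char-labelled
-- nodes); the Python marker key '' becomes the Bool 'term' on the node of the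
-- word's last character.
inductive CTrie : Type
  | nil : CTrie
  | node : Char → Bool → CTrie → CTrie → CTrie
deriving DecidableEq, Repr

-- the build loop: walk/extend the trie along the word (Python's setdefault
-- walk plus the final marker assignment)
def trieIns : CTrie → List Char → CTrie
  | t, [] => t
  | CTrie.nil, c :: cs => CTrie.node c (cs == []) (trieIns CTrie.nil cs) CTrie.nil
  | CTrie.node d tm ch sib, c :: cs =>
      if c == d then
        if cs == [] then CTrie.node d true ch sib
        else CTrie.node d tm (trieIns ch cs) sib
      else CTrie.node d tm ch (trieIns sib (c :: cs))
termination_by t l => (l.length, sizeOf t)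
decreasing_by all_goals (simp_all; omega)

def pvWords : List String :=
  ["end", "cup", "ice", "orange", "banana", "strawberry", "cherrie",
   "watermelon", "lemon", "mango", "grape", "coke", "pepsi", "sprite", "fanta"]

def pvTrie : CTrie := pvWords.foldl (fun t w => trieIns t w.toList) CTrie.nil

-- the lookup loop of Source B's check_error: follow edges, True on a missing edge
def trieHas : CTrie → List Char → Bool
  | CTrie.nil, _ => false
  | CTrie.node _ _ _ _, [] => false
  | CTrie.node d tm ch sib, c :: cs =>
      if c == d then (match cs with | [] => tm | _ => trieHas ch cs)
      else trieHas sib (c :: cs)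

def check_error_alt (gusfring : String) : Bool := !(trieHas pvTrie gusfring.toList)

-- ===== PRECONDITION & SPEC =====
def Spec_check_error (gusfring : String) (out : Bool) : Prop := out = check_error_alt gusfring
instance (gusfring : String) (out : Bool) : Decidable (Spec_check_error gusfring out) := by unfold Spec_check_error; infer_instance

-- ===== CLAIM (what is proved, stated in full; the proofs are below) =====
def Claim_equal_check_error : Prop := ∀ (gusfring : String), Dom_check_error gusfring → Spec_check_error gusfring (check_error gusfring)

-- ===== LEMMAS AND PROOFS =====

-- the set of words a trie stores
def trieWords : CTrie → List (List Char)
  | CTrie.nil => []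
  | CTrie.node c tm ch sib =>
      (if tm then [[c]] else []) ++ (trieWords ch).map (c :: ·) ++ trieWords sib

-- chars labelling the top-level sibling chain
def trieKeys : CTrie → List Char
  | CTrie.nil => []
  | CTrie.node c _ _ sib => c :: trieKeys sib

-- well-formedness: distinct chars at every sibling level (dict keys are unique)
def trieWF : CTrie → Bool
  | CTrie.nil => true
  | CTrie.node c _ ch sib => (!(trieKeys sib).contains c) && trieWF ch && trieWF sib

theorem trieWords_head_mem_keys (t : CTrie) (l : List Char) (h : l ∈ trieWords t) :
    ∃ d ds, l = d :: ds ∧ d ∈ trieKeys t := by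
  induction t with
  | nil => simp [trieWords] at h
  | node c tm ch sib ihc ihs =>
      simp only [trieWords, List.mem_append, List.mem_map] at h
      rcases h with ((h | ⟨w, _, rfl⟩) | h)
      · split at h <;> simp_all [trieKeys]
      · exact ⟨c, w, rfl, by simp [trieKeys]⟩
      · obtain ⟨d, ds, rfl, hd⟩ := ihs h
        exact ⟨d, ds, rfl, by simp [trieKeys, hd]⟩

theorem trieHas_iff_mem (t : CTrie) (l : List Char) (hwf : trieWF t = true) :
    trieHas t l = true ↔ l ∈ trieWords t := by
  induction t generalizing l with
  | nil => simp [trieHas, trieWords]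
  | node c tm ch sib ihc ihs =>
      simp only [trieWF, Bool.and_eq_true, Bool.not_eq_true'] at hwf
      obtain ⟨⟨hck, hwc⟩, hws⟩ := hwf
      have hck' : c ∉ trieKeys sib := by
        simpa [List.contains_eq_mem] using hck
      cases l with
      | nil =>
          simp only [trieHas]
          constructor
          · intro h; simp at h
          · intro h
            obtain ⟨d, ds, hh, _⟩ := trieWords_head_mem_keys _ _ h
            simp at hh
      | cons x xs =>
          simp only [trieHas, trieWords, List.mem_append, List.mem_map]
          by_cases hx : x = c
          · subst hx
            simp only [beq_self_eq_true, if_true]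
            cases xs with
            | nil =>
                constructor
                · intro h; left; left; simp [h]
                · rintro ((h | ⟨w, hw, he⟩) | h)
                  · split at h <;> simp_all
                  · have hw0 : w = [] := by simpa using he
                    subst hw0
                    obtain ⟨d, ds, hh, _⟩ := trieWords_head_mem_keys _ _ hw
                    simp at hh
                  · obtain ⟨d, ds, he2, hd⟩ := trieWords_head_mem_keys _ _ h
                    have : d = x := by
                      have := he2.symm
                      simpa using congrArg List.head? he2.symm
                    exact absurd (this ▸ hd) hck'
            | cons y ys =>
                rw [ihc (y :: ys) hwc]
                constructor
                · intro h; left; right; exact ⟨_, h, rfl⟩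
                · rintro ((h | ⟨w, hw, he⟩) | h)
                  · split at h <;> simp_all
                  · have hw0 : w = y :: ys := by simpa using he
                    subst hw0; exact hw
                  · obtain ⟨d, ds, he2, hd⟩ := trieWords_head_mem_keys _ _ h
                    have : d = x := by
                      simpa using congrArg List.head? he2.symm
                    exact absurd (this ▸ hd) hck'
          · have hbe : (x == c) = false := by simp [hx]
            rw [hbe]
            simp only [Bool.false_eq_true, if_false]
            rw [ihs (x :: xs) hws]
            constructor
            · intro h; right; exact h
            · rintro ((h | ⟨w, hw, he⟩) | h)
              · split at h <;> simp_all
              · have : c = x := by simpa using congrArg List.head? he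
                exact absurd this.symm hx
              · exact h

-- the 15 words in the order the trie stores them (a permutation of pvWords)
def pvWordsTrieOrder : List String :=
  ["end", "cup", "cherrie", "coke", "ice", "orange", "banana", "strawberry",
   "sprite", "watermelon", "lemon", "mango", "grape", "pepsi", "fanta"]

theorem pvTrie_wf : trieWF pvTrie = true := by
  simp [pvTrie, pvWords, trieIns, trieWF, trieKeys]

theorem pvTrie_words : trieWords pvTrie = pvWordsTrieOrder.map String.toList := by
  simp [pvTrie, pvWords, pvWordsTrieOrder, trieIns, trieWords]

theorem alt_eq (g : String) : check_error_alt g = !(decide (g ∈ pvWords)) := by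
  unfold check_error_alt
  congr 1
  rw [Bool.eq_iff_iff, trieHas_iff_mem _ _ pvTrie_wf, pvTrie_words, List.mem_map]
  simp only [decide_eq_true_eq]
  constructor
  · rintro ⟨w, hw, he⟩
    rw [← String.toList_inj.mp he]
    revert hw
    simp only [pvWordsTrieOrder, pvWords, List.mem_cons, List.not_mem_nil, or_false]
    tauto
  · intro h
    refine ⟨g, ?_, rfl⟩
    revert h
    simp only [pvWordsTrieOrder, pvWords, List.mem_cons, List.not_mem_nil, or_false]
    tauto

theorem a_eq (g : String) : check_error g = !(decide (g ∈ pvWords)) := by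
  by_cases h : g ∈ pvWords
  · simp only [h, decide_true, Bool.not_true]
    simp only [pvWords, List.mem_cons, List.not_mem_nil, or_false] at h
    rcases h with h | h | h | h | h | h | h | h | h | h | h | h | h | h | h <;>
      (subst h; decide)
  · simp only [h, decide_false, Bool.not_false]
    simp only [pvWords, List.mem_cons, List.not_mem_nil, or_false, not_or] at h
    obtain ⟨h1, h2, h3, h4, h5, h6, h7, h8, h9, h10, h11, h12, h13, h14, h15⟩ := h
    simp [check_error, pvScanRows, pvRowsCuttery, pvRowsJuice, pvRowsSoda,
      h1, h2, h3, h4, h5, h6, h7, h8, h9, h10, h11, h12, h13, h14, h15]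

-- ===== VERDICT (by name: the statement is the Claim_ definition above) =====
theorem check_error_spec : Claim_equal_check_error := by
  intro g _
  unfold Spec_check_error
  rw [a_eq, alt_eq]
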